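-- pv_equiv track=rewrite | github.com/cltl/wsd-dynamic-sense-vector | evaluate/score_utils.py | no_sense_data_for_non_gold_cand
-- ===== SOURCE A (Python) =====
-- def no_sense_data_for_non_gold_cand(emb_freq, source_wn_engs):
--     """
--     check whether there are training instances
--     for the other senses than the gold sense
--
--     :param dict emb_freq: mapping synset_id -> number of sense annotated examples
--     :param set source_wn_engs: set of gold synset ids
--
--     :rtype: bool
--     :return: True -> there are no training instances for non gold synset ids
--     False, there are instances for non gold synset ids
--     """
--     only_data_for_answer = True
--     for synset_id, freq in emb_freq.items():
--
--         if all([freq >= 1, # 1 or more training instances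
--                 synset_id not in source_wn_engs # check if in answer
--                 ]):
--             only_data_for_answer = False
--
--     return only_data_for_answer
-- ===== SOURCE B (Python) =====
-- def no_sense_data_for_non_gold_cand(emb_freq, source_wn_engs):
--     # Delete the gold keys from a copy of the dict, then one max-reduction
--     # over the frequencies that remain: no membership test per emb entry.
--     rest = dict(emb_freq)
--     for sid in source_wn_engs:
--         rest.pop(sid, None)
--     return max(rest.values(), default=0) < 1
-- ===== Notes on version B (the rewrite author's own statement) =====
-- stated objective: alternative
-- what changed: Instead of scanning emb_freq and flag-testing each key against the gold set, B deletes the gold keys from a copy of the dict (iterating the gold set) and then answers with one max-reduction over the remaining frequencies (max < 1).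
import Mathlib
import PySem

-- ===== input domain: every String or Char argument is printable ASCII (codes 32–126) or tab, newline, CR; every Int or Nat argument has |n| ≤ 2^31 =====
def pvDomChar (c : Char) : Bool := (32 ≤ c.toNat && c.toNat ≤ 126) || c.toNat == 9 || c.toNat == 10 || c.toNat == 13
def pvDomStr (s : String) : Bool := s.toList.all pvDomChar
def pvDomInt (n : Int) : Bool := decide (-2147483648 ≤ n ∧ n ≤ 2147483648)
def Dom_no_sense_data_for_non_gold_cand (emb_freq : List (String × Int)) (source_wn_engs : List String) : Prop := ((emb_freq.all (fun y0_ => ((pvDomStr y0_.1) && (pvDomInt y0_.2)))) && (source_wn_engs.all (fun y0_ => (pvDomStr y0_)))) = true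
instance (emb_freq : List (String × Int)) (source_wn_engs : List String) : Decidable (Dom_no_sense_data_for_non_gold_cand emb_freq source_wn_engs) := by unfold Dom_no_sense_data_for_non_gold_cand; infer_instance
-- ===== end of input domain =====

-- B deletes the gold keys from a copy of the dict and answers with one max-reduction
-- over the remaining frequencies, instead of A's per-entry membership-tested flag loop
-- (objective: alternative).

-- ===== PORT A =====
-- for synset_id, freq in emb_freq.items(): if all([freq >= 1, synset_id not in source_wn_engs]): only_data_for_answer = False
def no_sense_data_for_non_gold_cand (emb_freq : List (String × Int)) (source_wn_engs : List String) : Bool :=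
  emb_freq.foldl
    (fun only_data_for_answer p =>
      if decide (p.2 ≥ 1) && !(source_wn_engs.contains p.1) then false else only_data_for_answer)
    true

-- ===== PORT B =====
-- rest = dict(emb_freq); for sid in source_wn_engs: rest.pop(sid, None); return max(rest.values(), default=0) < 1
-- (emb_freq is the dict's association list with unique keys, so rest.pop(sid, None)
--  is exactly dropping the entries whose key is sid — exact on the dict domain)
def no_sense_data_for_non_gold_cand_alt (emb_freq : List (String × Int)) (source_wn_engs : List String) : Bool :=
  let rest := source_wn_engs.foldl (fun r sid => r.filter (fun p => !(p.1 == sid))) emb_freq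
  decide ((match PySem.List.max? (rest.map Prod.snd) (fun v => v) with
           | none => (0 : Int)
           | some m => m) < 1)

-- ===== PRECONDITION & SPEC =====
def Spec_no_sense_data_for_non_gold_cand (emb_freq : List (String × Int)) (source_wn_engs : List String) (out : Bool) : Prop := out = no_sense_data_for_non_gold_cand_alt emb_freq source_wn_engs
instance (emb_freq : List (String × Int)) (source_wn_engs : List String) (out : Bool) : Decidable (Spec_no_sense_data_for_non_gold_cand emb_freq source_wn_engs out) := by unfold Spec_no_sense_data_for_non_gold_cand; infer_instance

-- ===== CLAIM =====
def Claim_equal_no_sense_data_for_non_gold_cand : Prop := ∀ (emb_freq : List (String × Int)) (source_wn_engs : List String), Dom_no_sense_data_for_non_gold_cand emb_freq source_wn_engs → Spec_no_sense_data_for_non_gold_cand emb_freq source_wn_engs (no_sense_data_for_non_gold_cand emb_freq source_wn_engs)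

-- ===== LEMMAS AND PROOFS =====

-- A's flag loop computes 'every item violates (freq ≥ 1 ∧ sid ∉ gold)'.
theorem pv_foldA (src : List String) (l : List (String × Int)) (acc : Bool) :
    l.foldl (fun only_data_for_answer p =>
        if decide (p.2 ≥ 1) && !(src.contains p.1) then false else only_data_for_answer) acc
      = (acc && l.all (fun p => !(decide (p.2 ≥ 1) && !(src.contains p.1)))) := by
  induction l generalizing acc with
  | nil => simp
  | cons h t ih =>
    simp only [List.foldl_cons, List.all_cons, ih]
    by_cases hc : (decide (h.2 ≥ 1) && !(src.contains h.1)) = true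
    · rw [if_pos hc, hc]; simp
    · simp only [if_neg hc]
      rw [(Bool.not_eq_true _).mp hc]
      simp [Bool.and_left_comm]

-- B's deletion loop leaves exactly the entries whose key is not gold.
theorem pv_foldB (src : List String) (l : List (String × Int)) :
    src.foldl (fun r sid => r.filter (fun p => !(p.1 == sid))) l
      = l.filter (fun p => !(src.contains p.1)) := by
  induction src generalizing l with
  | nil => simp
  | cons s t ih =>
    simp only [List.foldl_cons, ih, List.filter_filter]
    congr 1
    funext p
    by_cases h1 : p.1 = s
    · simp [h1]
    · simp [List.contains_cons, h1, Bool.and_comm]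

-- max(vals, default=0) < 1  ↔  every value < 1
theorem pv_max_lt (vals : List Int) :
    ((match PySem.List.max? vals (fun v => v) with
      | none => (0 : Int)
      | some m => m) < 1) ↔ ∀ v ∈ vals, v < 1 := by
  cases h : PySem.List.max? vals (fun v => v) with
  | none =>
    have := (PySem.List.max?_eq_none_iff (xs := vals) (key := fun v => v)).mp h
    subst this; simp
  | some m =>
    constructor
    · intro hm v hv
      exact lt_of_le_of_lt (PySem.List.max?_isMax h v hv) hm
    · intro hall
      exact hall m (PySem.List.max?_mem h)

-- ===== VERDICT =====
theorem no_sense_data_for_non_gold_cand_spec : Claim_equal_no_sense_data_for_non_gold_cand := by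
  intro emb src _
  show no_sense_data_for_non_gold_cand emb src = no_sense_data_for_non_gold_cand_alt emb src
  rw [no_sense_data_for_non_gold_cand, pv_foldA, Bool.true_and,
      no_sense_data_for_non_gold_cand_alt]
  simp only [pv_foldB]
  rw [Bool.eq_iff_iff, List.all_eq_true, decide_eq_true_iff, pv_max_lt]
  constructor
  · intro hA v hv
    rw [List.mem_map] at hv
    obtain ⟨p, hp, hpv⟩ := hv
    rw [List.mem_filter] at hp
    have := hA p hp.1
    simp only [Bool.not_eq_eq_eq_not, Bool.not_true, Bool.and_eq_false_iff,
      decide_eq_false_iff_not, not_le] at this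
    rcases this with h1 | h2
    · omega
    · exact absurd h2 (by simpa using hp.2)
  · intro hB p hp
    by_cases hc : src.contains p.1
    · have hm : p.1 ∈ src := by simpa using hc
      simp [hm]
    · have hmem : p.2 ∈ (emb.filter (fun q => !(src.contains q.1))).map Prod.snd := by
        rw [List.mem_map]
        exact ⟨p, List.mem_filter.mpr ⟨hp, by simpa using hc⟩, rfl⟩
      have := hB _ hmem
      simp only [Bool.not_eq_eq_eq_not, Bool.not_true, Bool.and_eq_false_iff,
        decide_eq_false_iff_not, not_le]
      exact Or.inl (by omega)
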